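-- pv_equiv track=rewrite | github.com/amol-ship-it/agi-core | domains/arc/perception_primitives.py | interior_dominant_color
-- ===== SOURCE A (Python) =====
-- from collections import Counter
--
-- Grid = list[list[int]]
--
-- def dominant_color(grid: Grid) -> int:
--     """Return the most common non-background color."""
--     if not grid or not grid[0]:
--         return 0
--     flat = [grid[r][c] for r in range(len(grid)) for c in range(len(grid[0]))]
--     bg = Counter(flat).most_common(1)[0][0]
--     non_bg = [c for c in flat if c != bg]
--     if not non_bg:
--         return bg
--     return Counter(non_bg).most_common(1)[0][0]
--
-- def interior_dominant_color(grid: Grid) -> int: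
--     """Return the most common non-background color in the interior.
--
--     Interior = excluding first/last row and column. Useful for
--     detecting the "content" color inside a bordered grid.
--     """
--     if not grid or not grid[0]:
--         return 0
--     h, w = len(grid), len(grid[0])
--     if h <= 2 or w <= 2:
--         return dominant_color(grid)
--     flat = [grid[r][c] for r in range(1, h - 1) for c in range(1, w - 1)]
--     if not flat:
--         return 0
--     bg = Counter(flat).most_common(1)[0][0]
--     non_bg = [c for c in flat if c != bg]
--     if not non_bg:
--         return bg
--     return Counter(non_bg).most_common(1)[0][0]
-- ===== SOURCE B (Python) =====
-- from collections import Counter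
--
-- def interior_dominant_color(grid):
--     """Most common non-background color of the interior, via one Counter and most_common(2)."""
--     if not grid or not grid[0]:
--         return 0
--     h, w = len(grid), len(grid[0])
--     if h <= 2 or w <= 2:
--         cells = [x for row in grid for x in row[:w]]
--     else:
--         cells = [x for row in grid[1:h-1] for x in row[1:w-1]]
--     top = Counter(cells).most_common(2)
--     return top[1][0] if len(top) >= 2 else top[0][0]
-- ===== Notes on version B (the rewrite author's own statement) =====
-- stated objective: simpler
-- what changed: Replaces the find-background / filter-out / re-count pipeline (two Counters and an intermediate filtered list) by one Counter over the cells and a single most_common(2) selection: the second entry, when present, is the modal non-background color (one counting pass instead of count+filter+recount).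
import Mathlib
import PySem

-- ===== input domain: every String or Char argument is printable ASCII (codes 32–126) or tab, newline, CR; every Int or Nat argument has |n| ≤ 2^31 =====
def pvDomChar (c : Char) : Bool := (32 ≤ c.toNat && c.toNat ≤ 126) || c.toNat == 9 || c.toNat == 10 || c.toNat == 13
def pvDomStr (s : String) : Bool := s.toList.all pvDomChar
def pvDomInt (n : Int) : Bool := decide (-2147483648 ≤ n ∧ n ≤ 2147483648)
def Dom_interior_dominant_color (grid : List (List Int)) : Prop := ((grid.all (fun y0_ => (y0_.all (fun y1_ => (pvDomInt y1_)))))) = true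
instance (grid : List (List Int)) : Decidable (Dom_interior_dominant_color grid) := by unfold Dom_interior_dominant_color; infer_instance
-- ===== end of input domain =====

-- B replaces A's find-background / filter / re-count pipeline by one counter and a
-- single most_common(2) selection (objective: simpler); return values agree on Pre_.

-- ===== PORT A =====
def dominant_color (grid : List (List Int)) : Int :=
  if grid = [] ∨ grid.headD [] = [] then 0
  else
    let flat := (PySem.List.pyRange 0 (grid.length : Int)).flatMap
      (fun r => (PySem.List.pyRange 0 ((grid.headD []).length : Int)).map
        (fun c => PySem.List.pyGetD (PySem.List.pyGetD grid r []) c 0))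
    let bg := ((PySem.List.sorted (PySem.Dict.counter flat).items (fun p => p.2) true).headD (0, 0)).1
    let non_bg := flat.filter (fun c => decide (c ≠ bg))
    if non_bg = [] then bg
    else ((PySem.List.sorted (PySem.Dict.counter non_bg).items (fun p => p.2) true).headD (0, 0)).1

def interior_dominant_color (grid : List (List Int)) : Int :=
  if grid = [] ∨ grid.headD [] = [] then 0
  else
    let h : Int := grid.length
    let w : Int := (grid.headD []).length
    if h ≤ 2 ∨ w ≤ 2 then dominant_color grid
    else
      let flat := (PySem.List.pyRange 1 (h - 1)).flatMap
        (fun r => (PySem.List.pyRange 1 (w - 1)).map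
          (fun c => PySem.List.pyGetD (PySem.List.pyGetD grid r []) c 0))
      if flat = [] then 0
      else
        let bg := ((PySem.List.sorted (PySem.Dict.counter flat).items (fun p => p.2) true).headD (0, 0)).1
        let non_bg := flat.filter (fun c => decide (c ≠ bg))
        if non_bg = [] then bg
        else ((PySem.List.sorted (PySem.Dict.counter non_bg).items (fun p => p.2) true).headD (0, 0)).1

-- ===== PORT B =====
def interior_dominant_color_alt (grid : List (List Int)) : Int :=
  if grid = [] ∨ grid.headD [] = [] then 0
  else
    let h : Int := grid.length
    let w : Int := (grid.headD []).length
    let cells :=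
      if h ≤ 2 ∨ w ≤ 2 then
        grid.flatMap (fun row => PySem.List.slice row none (some w))
      else
        (PySem.List.slice grid (some 1) (some (h - 1))).flatMap
          (fun row => PySem.List.slice row (some 1) (some (w - 1)))
    let top := (PySem.List.sorted (PySem.Dict.counter cells).items (fun p => p.2) true).take 2
    match top with
    | [] => 0            -- unreachable totality guard: cells is nonempty once the first guard passed
    | [p] => p.1
    | _ :: p1 :: _ => p1.1

-- ===== PRECONDITION & SPEC =====
-- Pre_ excludes exactly the inputs on which A raises IndexError: a row shorter than the
-- indices A reads from it (row 0's length w for the h<=2/w<=2 case, w-1 for interior rows).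
def Pre_interior_dominant_color (grid : List (List Int)) : Prop :=
  grid = [] ∨ grid.headD [] = [] ∨
    (let w := (grid.headD []).length
     if grid.length ≤ 2 ∨ w ≤ 2 then ∀ row ∈ grid, w ≤ row.length
     else ∀ row ∈ (grid.drop 1).take (grid.length - 2), w - 1 ≤ row.length)
instance (grid : List (List Int)) : Decidable (Pre_interior_dominant_color grid) := by
  unfold Pre_interior_dominant_color; infer_instance

def pvWitness_interior_dominant_color : List (List Int) := [[1, 1, 1], [1, 2, 1], [1, 1, 1]]

def Spec_interior_dominant_color (grid : List (List Int)) (out : Int) : Prop := out = interior_dominant_color_alt grid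
instance (grid : List (List Int)) (out : Int) : Decidable (Spec_interior_dominant_color grid out) := by unfold Spec_interior_dominant_color; infer_instance

-- ===== CLAIM (what is proved, stated in full; the proofs are below) =====
def Claim_equal_interior_dominant_color : Prop := ∀ (grid : List (List Int)), Dom_interior_dominant_color grid → Pre_interior_dominant_color grid → Spec_interior_dominant_color grid (interior_dominant_color grid)

-- ===== LEMMAS AND PROOFS =====


theorem pv_add_filter {α : Type} [BEq α] [LawfulBEq α] (s : List α) (x : α) (q : α → Bool) :
    List.filter q (PySem.Set.add s x) =
      if q x then PySem.Set.add (List.filter q s) x else List.filter q s := by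
  simp only [PySem.Set.add, PySem.Set.contains, List.contains_eq_mem, List.mem_filter]
  by_cases hx : q x <;> by_cases hm : x ∈ s <;>
    simp [hx, hm, List.filter_append]

theorem pv_foldl_add_filter {α : Type} [BEq α] [LawfulBEq α] (l : List α) (q : α → Bool)
    (acc : List α) :
    List.foldl PySem.Set.add (List.filter q acc) (List.filter q l) =
      List.filter q (List.foldl PySem.Set.add acc l) := by
  induction l generalizing acc with
  | nil => rfl
  | cons x l ih =>
    simp only [List.filter_cons, List.foldl_cons]
    by_cases hx : q x
    · simp only [hx, if_pos, List.foldl_cons]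
      rw [show PySem.Set.add (List.filter q acc) x = List.filter q (PySem.Set.add acc x) by
        rw [pv_add_filter]; simp [hx]]
      exact ih _
    · simp only [hx, Bool.false_eq_true, if_neg, not_false_iff]
      rw [show List.filter q acc = List.filter q (PySem.Set.add acc x) by
        rw [pv_add_filter]; simp [hx]]
      exact ih _

theorem pv_ofList_filter {α : Type} [BEq α] [LawfulBEq α] (l : List α) (q : α → Bool) :
    PySem.Set.ofList (List.filter q l) = List.filter q (PySem.Set.ofList l) := by
  have := pv_foldl_add_filter l q []
  simpa [PySem.Set.ofList, PySem.Set.empty] using this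

theorem pv_ofList_ne_nil {α : Type} [BEq α] [LawfulBEq α] (l : List α) (h : l ≠ []) :
    PySem.Set.ofList l ≠ [] := by
  obtain ⟨x, xs, rfl⟩ := List.exists_cons_of_ne_nil h
  intro hnil
  have : x ∈ PySem.Set.ofList (x :: xs) := (PySem.Set.mem_ofList _ _).2 (List.mem_cons_self)
  simp [hnil] at this


theorem pv_insertBy_pairwise {α κ : Type} [LinearOrder κ] (key : α → κ) (x : α) (ys : List α)
    (h : ys.Pairwise (fun a b => key b ≤ key a)) :
    (PySem.List.insertBy (fun a b => decide (key b < key a)) x ys).Pairwise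
      (fun a b => key b ≤ key a) := by
  induction ys with
  | nil => simp [PySem.List.insertBy]
  | cons y ys ih =>
    rw [List.pairwise_cons] at h
    by_cases hb : key y < key x
    · simp only [PySem.List.insertBy, hb, decide_true, if_pos]
      refine List.pairwise_cons.2 ⟨?_, List.pairwise_cons.2 ⟨h.1, h.2⟩⟩
      intro z hz
      rcases List.mem_cons.1 hz with rfl | hz
      · exact hb.le
      · exact (h.1 z hz).trans hb.le
    · simp only [PySem.List.insertBy, hb, decide_false, Bool.false_eq_true, if_neg,
        not_false_iff]
      refine List.pairwise_cons.2 ⟨?_, ih h.2⟩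
      intro z hz
      rcases (PySem.List.mem_insertBy _ _ _ _).1 hz with rfl | hz
      · exact le_of_not_gt hb
      · exact h.1 z hz

theorem pv_insertBy_filter {α κ : Type} [LinearOrder κ] (key : α → κ) (x : α) (ys : List α)
    (q : α → Bool) (h : ys.Pairwise (fun a b => key b ≤ key a)) :
    List.filter q (PySem.List.insertBy (fun a b => decide (key b < key a)) x ys) =
      if q x then PySem.List.insertBy (fun a b => decide (key b < key a)) x (List.filter q ys)
      else List.filter q ys := by
  induction ys with
  | nil => by_cases hx : q x <;> simp [PySem.List.insertBy, hx]
  | cons y ys ih =>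
    rw [List.pairwise_cons] at h
    by_cases hb : key y < key x
    · simp only [PySem.List.insertBy, hb, decide_true, if_pos]
      by_cases hx : q x
      · simp only [hx, if_pos, List.filter_cons]
        by_cases hy : q y
        · simp only [hy, if_pos]
          simp [PySem.List.insertBy, hb]
        · simp only [hy, Bool.false_eq_true, if_neg, not_false_iff]
          -- x goes in front of filter q ys too, since every z ∈ ys has key z ≤ key y < key x
          cases hfy : List.filter q ys with
          | nil => simp [PySem.List.insertBy]
          | cons z zs =>
            have hz : z ∈ ys := List.mem_of_mem_filter (hfy ▸ List.mem_cons_self)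
            have : key z < key x := lt_of_le_of_lt (h.1 z hz) hb
            simp [PySem.List.insertBy, this]
      · simp [hx, List.filter_cons]
    · simp only [PySem.List.insertBy, hb, decide_false, Bool.false_eq_true, if_neg,
        not_false_iff, List.filter_cons]
      by_cases hy : q y
      · simp only [hy, if_pos]
        rw [ih h.2]
        by_cases hx : q x
        · simp [hx, PySem.List.insertBy, hb]
        · simp [hx]
      · simp only [hy, Bool.false_eq_true, if_neg, not_false_iff]
        exact ih h.2

theorem pv_foldl_insertBy_filter {α κ : Type} [LinearOrder κ] (key : α → κ) (xs : List α)
    (q : α → Bool) (acc : List α) (h : acc.Pairwise (fun a b => key b ≤ key a)) :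
    List.filter q (List.foldl (fun acc x => PySem.List.insertBy (fun a b => decide (key b < key a)) x acc) acc xs) =
      List.foldl (fun acc x => PySem.List.insertBy (fun a b => decide (key b < key a)) x acc)
        (List.filter q acc) (List.filter q xs) := by
  induction xs generalizing acc with
  | nil => rfl
  | cons x xs ih =>
    simp only [List.foldl_cons, List.filter_cons]
    rw [ih _ (pv_insertBy_pairwise key x acc h)]
    by_cases hx : q x
    · simp only [hx, if_pos]
      rw [pv_insertBy_filter key x acc q h]
      simp [hx]
    · simp only [hx, Bool.false_eq_true, if_neg, not_false_iff]
      rw [pv_insertBy_filter key x acc q h]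
      simp [hx]

theorem pv_sorted_rev_filter {α κ : Type} [LinearOrder κ] (key : α → κ) (xs : List α)
    (q : α → Bool) :
    PySem.List.sorted (List.filter q xs) key true = List.filter q (PySem.List.sorted xs key true) := by
  rw [PySem.List.sorted_rev_eq_foldl_insertBy, PySem.List.sorted_rev_eq_foldl_insertBy,
    pv_foldl_insertBy_filter key xs q [] List.Pairwise.nil]
  rfl

theorem pv_counter_filter_items (cells : List Int) (bg : Int) :
    (PySem.Dict.counter (cells.filter (fun c => decide (c ≠ bg)))).items =
      (PySem.Dict.counter cells).items.filter (fun p => decide (p.1 ≠ bg)) := by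
  rw [PySem.Dict.items_counter, PySem.Dict.items_counter, List.filter_map]
  have hof : PySem.Set.ofList (cells.filter (fun c => decide (c ≠ bg))) =
      List.filter (fun c => decide (c ≠ bg)) (PySem.Set.ofList cells) := by
    exact pv_ofList_filter cells (fun c => decide (c ≠ bg))
  rw [hof]
  have hcomp : ((fun p : Int × Int => decide (p.1 ≠ bg)) ∘ fun k => (k, (List.count k cells : Int)))
      = fun c => decide (c ≠ bg) := by
    funext c; rfl
  rw [hcomp]
  apply List.map_congr_left
  intro k hk
  have hkne : (k ≠ bg) := by
    have := (List.mem_filter.1 hk).2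
    simpa using this
  have : List.count k (cells.filter (fun c => decide (c ≠ bg))) = List.count k cells :=
    List.count_filter (by simpa using hkne)
  simpa using this


theorem pv_row_take (row : List Int) (m : Nat) (h : m ≤ row.length) :
    (List.range m).map (fun c : Nat => PySem.List.pyGetD row ((c : Int)) 0) = row.take m := by
  apply List.ext_getElem
  · simp [Nat.min_eq_left h]
  · intro i h1 h2
    have him : i < m := by simpa using h1
    have hir : i < row.length := lt_of_lt_of_le him h
    simp only [List.getElem_map, List.getElem_range, List.getElem_take]
    rw [PySem.List.pyGetD_natCast, List.getD_eq_getElem _ _ hir]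

theorem pv_map_range_getD {α : Type} (l : List α) (d : α) :
    (List.range l.length).map (fun r => l.getD r d) = l := by
  apply List.ext_getElem
  · simp
  · intro i h1 h2
    simp only [List.getElem_map, List.getElem_range]
    rw [List.getD_eq_getElem _ _ h2]

theorem pv_flat_small (grid : List (List Int)) (m : Nat)
    (hw : ∀ row ∈ grid, m ≤ row.length) :
    (PySem.List.pyRange 0 (grid.length : Int)).flatMap
      (fun r => (PySem.List.pyRange 0 (m : Int)).map
        (fun c => PySem.List.pyGetD (PySem.List.pyGetD grid r []) c 0)) =
      grid.flatMap (fun row => PySem.List.slice row none (some (m : Int))) := by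
  rw [PySem.List.pyRange_zero_natCast, PySem.List.pyRange_zero_natCast, List.flatMap_map]
  calc (List.range grid.length).flatMap
        (fun r : Nat => ((List.range m).map (fun k : Nat => (k : Int))).map
          (fun c => PySem.List.pyGetD (PySem.List.pyGetD grid (↑r) []) c 0))
      = (List.range grid.length).flatMap (fun r : Nat => (grid.getD r []).take m) := by
        apply List.flatMap_congr
        intro r hr
        rw [List.map_map, PySem.List.pyGetD_natCast]
        have hmem : grid.getD r [] ∈ grid := by
          have hrl : r < grid.length := by simpa using hr
          rw [List.getD_eq_getElem _ _ hrl]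
          exact List.getElem_mem hrl
        simpa [Function.comp_def] using pv_row_take (grid.getD r []) m (hw _ hmem)
    _ = grid.flatMap (fun row => row.take m) := by
        conv_rhs => rw [← pv_map_range_getD grid []]
        rw [List.flatMap_map]
    _ = grid.flatMap (fun row => PySem.List.slice row none (some (m : Int))) := by
        apply List.flatMap_congr
        intro row _
        rw [PySem.List.slice_to row (by positivity), Int.toNat_natCast]


theorem pv_range_shift (n : Nat) (hn : 3 ≤ n) :
    PySem.List.pyRange 1 ((n : Int) - 1) =
      (List.range (n - 2)).map (fun k : Nat => ((k + 1 : Nat) : Int)) := by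
  rw [PySem.List.pyRange_of_pos _ _ (by norm_num : (0:Int) < 1)]
  have h1 : (1 : Int) < (n : Int) - 1 := by
    have : (3 : Int) ≤ (n : Int) := by exact_mod_cast hn
    omega
  rw [if_pos h1]
  have : (((n : Int) - 1 - 1 + 1 - 1) / 1).toNat = n - 2 := by
    rw [Int.ediv_one]
    omega
  rw [this]
  apply List.map_congr_left
  intro k _
  push_cast
  ring

theorem pv_row_interior (row : List Int) (m : Nat) (hm : 3 ≤ m) (h : m - 1 ≤ row.length) :
    (List.range (m - 2)).map (fun c : Nat => PySem.List.pyGetD row ((c + 1 : Nat) : Int) 0) =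
      (row.drop 1).take (m - 2) := by
  apply List.ext_getElem
  · simp only [List.length_map, List.length_range, List.length_take, List.length_drop]
    omega
  · intro i h1 h2
    have him : i < m - 2 := by simpa using h1
    have hir : i + 1 < row.length := by omega
    simp only [List.getElem_map, List.getElem_range, List.getElem_take, List.getElem_drop]
    rw [PySem.List.pyGetD_natCast, List.getD_eq_getElem _ _ hir]
    congr 1
    omega

theorem pv_outer_interior (grid : List (List Int)) (hn : 3 ≤ grid.length) :
    (List.range (grid.length - 2)).map (fun r : Nat => grid.getD (r + 1) []) =
      (grid.drop 1).take (grid.length - 2) := by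
  apply List.ext_getElem
  · simp only [List.length_map, List.length_range, List.length_take, List.length_drop]
    omega
  · intro i h1 h2
    have hir : i + 1 < grid.length := by
      simp only [List.length_map, List.length_range] at h1
      omega
    simp only [List.getElem_map, List.getElem_range, List.getElem_take, List.getElem_drop]
    rw [List.getD_eq_getElem _ _ hir]
    congr 1
    omega

theorem pv_flat_interior (grid : List (List Int)) (m : Nat)
    (hn : 3 ≤ grid.length) (hm : 3 ≤ m)
    (hw : ∀ row ∈ (grid.drop 1).take (grid.length - 2), m - 1 ≤ row.length) :
    (PySem.List.pyRange 1 ((grid.length : Int) - 1)).flatMap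
      (fun r => (PySem.List.pyRange 1 ((m : Int) - 1)).map
        (fun c => PySem.List.pyGetD (PySem.List.pyGetD grid r []) c 0)) =
      (PySem.List.slice grid (some 1) (some ((grid.length : Int) - 1))).flatMap
        (fun row => PySem.List.slice row (some 1) (some ((m : Int) - 1))) := by
  rw [pv_range_shift grid.length hn, pv_range_shift m hm, List.flatMap_map]
  have hslice_grid : PySem.List.slice grid (some 1) (some ((grid.length : Int) - 1)) =
      (grid.drop 1).take (grid.length - 2) := by
    have : ((grid.length : Int) - 1) = ((grid.length - 1 : Nat) : Int) := by omega
    rw [this, show ((1:Int)) = ((1:Nat):Int) by norm_num, PySem.List.slice_natCast]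
    congr 1
  have hslice_row : ∀ row ∈ (grid.drop 1).take (grid.length - 2),
      PySem.List.slice row (some 1) (some ((m : Int) - 1)) = (row.drop 1).take (m - 2) := by
    intro row _
    have : ((m : Int) - 1) = ((m - 1 : Nat) : Int) := by omega
    rw [this, show ((1:Int)) = ((1:Nat):Int) by norm_num, PySem.List.slice_natCast]
    congr 1
  rw [hslice_grid]
  calc (List.range (grid.length - 2)).flatMap
        (fun r : Nat => ((List.range (m - 2)).map (fun k : Nat => ((k + 1 : Nat) : Int))).map
          (fun c => PySem.List.pyGetD (PySem.List.pyGetD grid ((r + 1 : Nat) : Int) []) c 0))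
      = (List.range (grid.length - 2)).flatMap
          (fun r : Nat => ((grid.getD (r + 1) []).drop 1).take (m - 2)) := by
        apply List.flatMap_congr
        intro r hr
        have hrl : r < grid.length - 2 := by simpa using hr
        rw [List.map_map, PySem.List.pyGetD_natCast]
        have hmem : grid.getD (r + 1) [] ∈ (grid.drop 1).take (grid.length - 2) := by
          have h2 : r < ((grid.drop 1).take (grid.length - 2)).length := by
            simp only [List.length_take, List.length_drop]
            omega
          have : grid.getD (r + 1) [] = ((grid.drop 1).take (grid.length - 2))[r] := by
            simp only [List.getElem_take, List.getElem_drop]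
            rw [List.getD_eq_getElem _ _ (by omega : r + 1 < grid.length)]
            congr 1
            omega
          rw [this]
          exact List.getElem_mem h2
        simpa [Function.comp_def] using pv_row_interior _ m hm (hw _ hmem)
    _ = ((grid.drop 1).take (grid.length - 2)).flatMap
          (fun row => (row.drop 1).take (m - 2)) := by
        conv_rhs => rw [← pv_outer_interior grid hn]
        rw [List.flatMap_map]
    _ = ((grid.drop 1).take (grid.length - 2)).flatMap
          (fun row => PySem.List.slice row (some 1) (some ((m : Int) - 1))) := by
        apply List.flatMap_congr
        intro row hrow
        exact (hslice_row row hrow).symm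

theorem pv_sorted_tail (cells : List Int) (p0 : Int × Int) (t : List (Int × Int))
    (hs : PySem.List.sorted (PySem.Dict.counter cells).items (fun p => p.2) true = p0 :: t) :
    PySem.List.sorted (PySem.Dict.counter (cells.filter (fun c => decide (c ≠ p0.1)))).items
      (fun p => p.2) true = t := by
  rw [pv_counter_filter_items, pv_sorted_rev_filter, hs]
  -- keys of the sorted items are nodup; p0.1 not among t's keys
  have hperm : (PySem.List.sorted (PySem.Dict.counter cells).items (fun p => p.2) true).Perm
      (PySem.Dict.counter cells).items := PySem.List.sorted_perm _ _ _
  have hnodup : ((PySem.Dict.counter cells).items.map (·.1)).Nodup :=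
    PySem.Dict.nodup_keys_counter cells
  have hnodup2 : ((p0 :: t).map (·.1)).Nodup := by
    refine (List.Perm.nodup_iff ?_).2 hnodup
    exact (hs ▸ hperm).map _
  simp only [List.map_cons, List.nodup_cons] at hnodup2
  rw [List.filter_cons]
  simp only [ne_eq, not_true_eq_false, decide_false, Bool.false_eq_true, if_neg, not_false_iff]
  apply List.filter_eq_self.2
  intro p hp
  have : p.1 ∈ t.map (·.1) := List.mem_map_of_mem hp
  have hne : p.1 ≠ p0.1 := fun h => hnodup2.1 (h ▸ this)
  simpa using hne

theorem pv_main (cells : List Int) (hne : cells ≠ []) :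
    (let s := PySem.List.sorted (PySem.Dict.counter cells).items (fun p => p.2) true
     let bg := (s.headD (0, 0)).1
     let non_bg := cells.filter (fun c => decide (c ≠ bg))
     if non_bg = [] then bg
     else ((PySem.List.sorted (PySem.Dict.counter non_bg).items (fun p => p.2) true).headD (0, 0)).1) =
    (match (PySem.List.sorted (PySem.Dict.counter cells).items (fun p => p.2) true).take 2 with
     | [] => (0 : Int)
     | [p] => p.1
     | _ :: p1 :: _ => p1.1) := by
  have hs_ne : PySem.List.sorted (PySem.Dict.counter cells).items (fun p => p.2) true ≠ [] := by
    rw [Ne, PySem.List.sorted_eq_nil_iff, PySem.Dict.items_counter, List.map_eq_nil_iff]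
    exact pv_ofList_ne_nil cells hne
  obtain ⟨p0, t, hs⟩ := List.exists_cons_of_ne_nil hs_ne
  have htail := pv_sorted_tail cells p0 t hs
  simp only [hs, List.headD_cons]
  have hnb : (cells.filter (fun c => decide (c ≠ p0.1)) = []) ↔ t = [] := by
    constructor
    · intro h
      rw [← htail, h]
      rfl
    · intro h
      rw [h] at htail
      rw [PySem.List.sorted_eq_nil_iff, PySem.Dict.items_counter, List.map_eq_nil_iff] at htail
      by_contra hx
      exact pv_ofList_ne_nil _ hx htail
  cases t with
  | nil =>
    simp only [List.take, if_pos (hnb.2 rfl)]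
  | cons p1 t' =>
    have hf : cells.filter (fun c => decide (c ≠ p0.1)) ≠ [] := by
      intro h
      exact (List.cons_ne_nil p1 t') (hnb.1 h)
    rw [if_neg hf, htail]
    rfl

-- ===== VERDICT (by name: the statement is the Claim_ definition above) =====
theorem interior_dominant_color_spec : Claim_equal_interior_dominant_color := by
  intro grid _ hpre
  unfold Spec_interior_dominant_color interior_dominant_color interior_dominant_color_alt
  by_cases hg : grid = [] ∨ grid.headD [] = []
  · rw [if_pos hg, if_pos hg]
  · rw [if_neg hg, if_neg hg]
    simp only []
    have hgne : grid ≠ [] := fun h => hg (Or.inl h)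
    have hrne : grid.headD [] ≠ [] := fun h => hg (Or.inr h)
    have hm1 : 1 ≤ (grid.headD []).length := List.length_pos_of_ne_nil hrne
    unfold Pre_interior_dominant_color at hpre
    rcases hpre with h | h | hpre
    · exact absurd h hgne
    · exact absurd h hrne
    simp only [] at hpre
    by_cases hsmall : ((grid.length : Int) ≤ 2 ∨ ((grid.headD []).length : Int) ≤ 2)
    · rw [if_pos hsmall, if_pos hsmall]
      have hcond : grid.length ≤ 2 ∨ (grid.headD []).length ≤ 2 := by omega
      rw [if_pos hcond] at hpre
      unfold dominant_color
      rw [if_neg hg]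
      simp only []
      rw [pv_flat_small grid _ hpre]
      have hcells : grid.flatMap
          (fun row => PySem.List.slice row none (some ((grid.headD []).length : Int))) ≠ [] := by
        obtain ⟨r0, rest, rfl⟩ := List.exists_cons_of_ne_nil hgne
        intro hnil
        rw [List.flatMap_cons, List.append_eq_nil_iff] at hnil
        have hsl : PySem.List.slice r0 none (some (((r0 :: rest).headD []).length : Int)) = r0 := by
          rw [PySem.List.slice_to _ (by positivity), Int.toNat_natCast]
          simp
        rw [hsl] at hnil
        exact hrne hnil.1
      exact pv_main _ hcells
    · rw [if_neg hsmall, if_neg hsmall]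
      have hn3 : 3 ≤ grid.length := by
        have := List.length_pos_of_ne_nil hgne
        omega
      have hm3 : 3 ≤ (grid.headD []).length := by omega
      have hcond : ¬(grid.length ≤ 2 ∨ (grid.headD []).length ≤ 2) := by omega
      rw [if_neg hcond] at hpre
      rw [pv_flat_interior grid _ hn3 hm3 hpre]
      have hsgrid : PySem.List.slice grid (some 1) (some ((grid.length : Int) - 1)) =
          (grid.drop 1).take (grid.length - 2) := by
        have h1 : ((grid.length : Int) - 1) = ((grid.length - 1 : Nat) : Int) := by omega
        rw [h1, show ((1 : Int)) = ((1 : Nat) : Int) by norm_num, PySem.List.slice_natCast]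
        congr 1
      have hcells : (PySem.List.slice grid (some 1) (some ((grid.length : Int) - 1))).flatMap
          (fun row => PySem.List.slice row (some 1) (some (((grid.headD []).length : Int) - 1))) ≠ [] := by
        rw [hsgrid]
        have hlen : ((grid.drop 1).take (grid.length - 2)).length = grid.length - 2 := by
          simp only [List.length_take, List.length_drop]
          omega
        have htne : (grid.drop 1).take (grid.length - 2) ≠ [] := by
          intro h
          rw [h] at hlen
          simp at hlen
          omega
        obtain ⟨row0, trest, heq⟩ := List.exists_cons_of_ne_nil htne
        intro hnil
        rw [heq, List.flatMap_cons, List.append_eq_nil_iff] at hnil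
        have hrow0 : row0 ∈ (grid.drop 1).take (grid.length - 2) := by
          rw [heq]; exact List.mem_cons_self
        have hwr : (grid.headD []).length - 1 ≤ row0.length := hpre row0 hrow0
        have hsl : (PySem.List.slice row0 (some 1) (some (((grid.headD []).length : Int) - 1))).length
            = min ((grid.headD []).length - 2) (row0.length - 1) := by
          have h1 : (((grid.headD []).length : Int) - 1) = (((grid.headD []).length - 1 : Nat) : Int) := by
            omega
          rw [h1, show ((1 : Int)) = ((1 : Nat) : Int) by norm_num, PySem.List.slice_natCast]
          simp only [List.length_take, List.length_drop]
          omega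
        rw [hnil.1] at hsl
        simp only [List.length_nil] at hsl
        omega
      rw [if_neg hcells]
      exact pv_main _ hcells
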